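-- pv_equiv track=rewrite | github.com/valsavchenko/basic_algos | dynamic_programming/cut_rod.py | costly_cuts
-- ===== SOURCE A (Python) =====
-- def costly_cuts(prices, cut_price, total_length):
--   assert total_length <= len(prices), "Not enough prices to find an optimal solution"
--   assert 0 <= cut_price, "Cut price is assumed to be positive"
--
--   optimals = [None for i in range(total_length)]
--   dirty_cuts = [None for i in range(total_length)]
--   for i in range(0, total_length):
--     optimals[i] = prices[i]
--     dirty_cuts[i] = i
--     for j in range(0, i):
--       test = prices[j] - cut_price + optimals[i-j-1]
--       if optimals[i] < test:
--         optimals[i] = test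
--         dirty_cuts[i] = j
--
--   i = total_length
--   cuts = []
--   while i > 0:
--     cuts.append(dirty_cuts[i-1] + 1)
--     i = i - dirty_cuts[i-1] - 1
--
--   return (optimals[total_length-1], cuts)
-- ===== SOURCE B (Python) =====
-- def first_piece(prices, cut_price, best, n):
--   # A's tie-break: the whole rod wins ties; otherwise the smallest first-piece length.
--   if best[n] == prices[n - 1] - cut_price:
--     return n
--   return next(k for k in range(1, n)
--               if best[n] == prices[k - 1] - cut_price + best[n - k])
--
--
-- def costly_cuts(prices, cut_price, total_length):
--   assert total_length <= len(prices), "Not enough prices to find an optimal solution"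
--   assert 0 <= cut_price, "Cut price is assumed to be positive"
--
--   # Shifted-weight formulation: charge every piece one cut and refund a single
--   # cut at the end, so the no-cut case needs no special treatment.  best[n] is
--   # the optimum of the shifted problem for a rod of length n (best[0] = 0).
--   best = [0]
--   for n in range(1, total_length + 1):
--     best.append(max(prices[k - 1] - cut_price + best[n - k] for k in range(1, n + 1)))
--
--   # Traceback by recomputation: no choice array is ever stored.
--   cuts = []
--   n = total_length
--   while n > 0:
--     piece = first_piece(prices, cut_price, best, n)
--     cuts.append(piece)
--     n -= piece
--
--   return (best[total_length] + cut_price, cuts)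
-- ===== Notes on version B (the rewrite author's own statement) =====
-- stated objective: alternative
-- what changed: Replaces A's DP over raw prices with parallel choice/value arrays by a shifted-weight formulation (every piece is charged one cut, a single cut is refunded at the end, so the no-cut case needs no special treatment) that stores ONLY a value table including a base entry for length 0, and reconstructs the cut list by recomputation traceback (re-scanning for the first length achieving the optimum) instead of reading a stored choice array.
import Mathlib
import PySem

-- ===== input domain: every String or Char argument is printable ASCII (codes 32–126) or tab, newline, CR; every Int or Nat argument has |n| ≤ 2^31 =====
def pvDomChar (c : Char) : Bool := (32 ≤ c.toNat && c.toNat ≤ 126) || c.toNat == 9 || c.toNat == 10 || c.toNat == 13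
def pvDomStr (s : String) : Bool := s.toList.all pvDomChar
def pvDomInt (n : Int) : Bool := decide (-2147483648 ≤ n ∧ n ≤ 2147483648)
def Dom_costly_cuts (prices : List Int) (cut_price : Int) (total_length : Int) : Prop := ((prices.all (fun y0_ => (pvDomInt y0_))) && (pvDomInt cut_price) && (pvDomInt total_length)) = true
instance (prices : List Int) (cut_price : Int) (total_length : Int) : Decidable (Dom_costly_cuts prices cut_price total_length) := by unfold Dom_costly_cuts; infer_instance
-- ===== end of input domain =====

-- B replaces A's parallel value/choice arrays by a shifted-weight value-only DP (each piece is
-- charged one cut, a single cut is refunded at the end, so 'no cut' is just the piece of full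
-- length) and rebuilds the cut list by recomputation traceback; objective: alternative.

-- ===== PORT A =====
-- outer loop body: i-th iteration appends optimals[i] and dirty_cuts[i]
-- (the in-place cell optimals[i]/dirty_cuts[i] is threaded as the inner fold's state;
--  None placeholders are never read, so the arrays grow left-to-right by append)
def pvOuterA (prices : List Int) (cut_price : Int) (s : List Int × List Int) (i : Int) : List Int × List Int :=
  let fin := (PySem.List.pyRange 0 i 1).foldl
    (fun (a : Int × Int) j =>
      let test := PySem.List.pyGetD prices j 0 - cut_price + PySem.List.pyGetD s.1 (i - j - 1) 0
      if a.1 < test then (test, j) else a)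
    (PySem.List.pyGetD prices i 0, i)
  (s.1 ++ [fin.1], s.2 ++ [fin.2])

-- the trailing while loop (fuel = total_length.toNat suffices: i strictly decreases inside Pre_)
def pvRebuildA (dirty : List Int) : Nat → Int → List Int
  | 0, _ => []
  | fuel + 1, i =>
    if 0 < i then
      let c := PySem.List.pyGetD dirty (i - 1) 0 + 1
      c :: pvRebuildA dirty fuel (i - c)
    else []

def costly_cuts (prices : List Int) (cut_price : Int) (total_length : Int) : Int × List Int :=
  -- the two asserts and the IndexError of optimals[total_length-1] on total_length ≤ 0 are excluded by Pre_
  let st := (PySem.List.pyRange 0 total_length 1).foldl (pvOuterA prices cut_price) ([], [])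
  (PySem.List.pyGetD st.1 (total_length - 1) 0, pvRebuildA st.2 total_length.toNat total_length)

-- ===== PORT B =====
-- best.append(max(prices[k-1] - cut_price + best[n-k] for k in range(1, n+1)))
def pvBestStep (prices : List Int) (cut_price : Int) (best : List Int) (n : Int) : List Int :=
  best ++ [(PySem.List.max? ((PySem.List.pyRange 1 (n + 1) 1).map
      (fun k => PySem.List.pyGetD prices (k - 1) 0 - cut_price + PySem.List.pyGetD best (n - k) 0))
      (fun v => v)).getD 0]

-- first_piece: the whole rod on a tie, else the smallest k achieving the optimum;
-- Python's next(...) would raise StopIteration only if no k matched, which never happens for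
-- the computed table, so the .getD 0 default is never taken
def pvFirstPiece (prices : List Int) (cut_price : Int) (best : List Int) (n : Int) : Int :=
  if PySem.List.pyGetD best n 0 = PySem.List.pyGetD prices (n - 1) 0 - cut_price then n
  else ((PySem.List.pyRange 1 n 1).find? (fun k =>
      PySem.List.pyGetD best n 0 ==
        PySem.List.pyGetD prices (k - 1) 0 - cut_price + PySem.List.pyGetD best (n - k) 0)).getD 0

-- the trailing while loop of B (fuel as in A's port)
def pvTraceB (prices : List Int) (cut_price : Int) (best : List Int) : Nat → Int → List Int
  | 0, _ => []
  | fuel + 1, n =>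
    if 0 < n then
      let piece := pvFirstPiece prices cut_price best n
      piece :: pvTraceB prices cut_price best fuel (n - piece)
    else []

def costly_cuts_alt (prices : List Int) (cut_price : Int) (total_length : Int) : Int × List Int :=
  let best := (PySem.List.pyRange 1 (total_length + 1) 1).foldl (pvBestStep prices cut_price) [0]
  (PySem.List.pyGetD best total_length 0 + cut_price,
   pvTraceB prices cut_price best total_length.toNat total_length)

-- ===== PRECONDITION & SPEC =====
-- Pre_ excludes exactly the inputs where A raises: assert failures (total_length > len(prices)
-- or cut_price < 0) and the IndexError of optimals[total_length-1] when total_length ≤ 0.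
def Pre_costly_cuts (prices : List Int) (cut_price : Int) (total_length : Int) : Prop :=
  0 ≤ cut_price ∧ 1 ≤ total_length ∧ total_length ≤ (prices.length : Int)
instance (prices : List Int) (cut_price : Int) (total_length : Int) : Decidable (Pre_costly_cuts prices cut_price total_length) := by unfold Pre_costly_cuts; infer_instance
def pvWitness_costly_cuts : List Int × Int × Int := ([1, 5, 8], 1, 3)

def Spec_costly_cuts (prices : List Int) (cut_price : Int) (total_length : Int) (out : Int × List Int) : Prop := out = costly_cuts_alt prices cut_price total_length
instance (prices : List Int) (cut_price : Int) (total_length : Int) (out : Int × List Int) : Decidable (Spec_costly_cuts prices cut_price total_length out) := by unfold Spec_costly_cuts; infer_instance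

-- ===== CLAIM (what is proved, stated in full; the proofs are below) =====
def Claim_equal_costly_cuts : Prop := ∀ (prices : List Int) (cut_price : Int) (total_length : Int), Dom_costly_cuts prices cut_price total_length → Pre_costly_cuts prices cut_price total_length → Spec_costly_cuts prices cut_price total_length (costly_cuts prices cut_price total_length)

-- ===== LEMMAS AND PROOFS =====

-- B's table after m iterations, as a recursion on the iteration count
def pvTabB (prices : List Int) (cut_price : Int) : Nat → List Int
  | 0 => [0]
  | m + 1 => pvBestStep prices cut_price (pvTabB prices cut_price m) ((m : Int) + 1)

-- running max of g over a list of indices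
def pvFM (g : Int → Int) (l : List Int) (v : Int) : Int := l.foldl (fun a j => max a (g j)) v

lemma pvFM_nil (g : Int → Int) (v : Int) : pvFM g [] v = v := rfl

lemma pvFM_cons (g : Int → Int) (x : Int) (l : List Int) (v : Int) :
    pvFM g (x :: l) v = pvFM g l (max v (g x)) := rfl

lemma pvFM_ge (g : Int → Int) (l : List Int) : ∀ v, v ≤ pvFM g l v := by
  induction l with
  | nil => intro v; simp [pvFM]
  | cons x xs ih =>
    intro v
    rw [pvFM_cons]
    exact le_trans (le_max_left v (g x)) (ih _)

lemma pvFM_init_max (g : Int → Int) (l : List Int) : ∀ a b,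
    pvFM g l (max a b) = max (pvFM g l a) b := by
  induction l with
  | nil => intro a b; simp [pvFM]
  | cons x xs ih =>
    intro a b
    rw [pvFM_cons, pvFM_cons, max_right_comm, ih]

lemma pvFM_attained (g : Int → Int) (l : List Int) : ∀ v,
    pvFM g l v = v ∨ ∃ j ∈ l, g j = pvFM g l v := by
  induction l with
  | nil => intro v; left; rfl
  | cons x xs ih =>
    intro v
    rw [pvFM_cons]
    rcases ih (max v (g x)) with h | ⟨j, hj, hgj⟩
    · rw [h]
      rcases max_choice v (g x) with h' | h'
      · left; exact h'
      · right; exact ⟨x, List.mem_cons_self, h'.symm⟩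
    · right; exact ⟨j, List.mem_cons_of_mem _ hj, hgj⟩

-- subtracting a constant commutes with the running max
lemma pvFM_sub (g : Int → Int) (c : Int) (l : List Int) : ∀ v,
    l.foldl (fun a j => max a (g j - c)) (v - c) = pvFM g l v - c := by
  induction l with
  | nil => intro v; simp [pvFM]
  | cons x xs ih =>
    intro v
    rw [pvFM_cons]
    simp only [List.foldl]
    rw [show max (v - c) (g x - c) = max v (g x) - c by omega, ih]

-- A's strict-improvement inner loop, characterized: final value is the running max,
-- the stored index is the initial one on a tie with the start, else the FIRST index attaining it
lemma pv_strict_fold (g : Int → Int) : ∀ (l : List Int) (v0 j0 : Int),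
    l.foldl (fun (a : Int × Int) j => if a.1 < g j then (g j, j) else a) (v0, j0)
      = (pvFM g l v0,
         if pvFM g l v0 = v0 then j0
         else (l.find? (fun j => pvFM g l v0 == g j)).getD j0) := by
  intro l
  induction l with
  | nil => intro v0 j0; simp [pvFM]
  | cons x xs ih =>
    intro v0 j0
    simp only [List.foldl]
    rw [pvFM_cons]
    by_cases h : v0 < g x
    · rw [if_pos h, ih (g x) x, max_eq_right (le_of_lt h)]
      have hM : g x ≤ pvFM g xs (g x) := pvFM_ge g xs (g x)
      have hMne : pvFM g xs (g x) ≠ v0 := by omega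
      rw [if_neg hMne]
      by_cases hx : pvFM g xs (g x) = g x
      · rw [if_pos hx, List.find?_cons_of_pos (by simp [hx]), Option.getD_some]
      · rw [if_neg hx, List.find?_cons_of_neg (by simp [hx])]
        rcases pvFM_attained g xs (g x) with h' | ⟨j, hj, hgj⟩
        · exact absurd h' hx
        · have : (xs.find? (fun j => pvFM g xs (g x) == g j)).isSome := by
            rw [List.find?_isSome]
            exact ⟨j, hj, by simp [hgj]⟩
          rcases Option.isSome_iff_exists.mp this with ⟨k, hk⟩
          rw [hk, Option.getD_some, Option.getD_some]
    · rw [if_neg h, ih v0 j0, max_eq_left (by omega)]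
      by_cases hv : pvFM g xs v0 = v0
      · rw [if_pos hv, if_pos hv]
      · have hge : v0 ≤ pvFM g xs v0 := pvFM_ge g xs v0
        rw [if_neg hv, if_neg hv, List.find?_cons_of_neg (by simp; omega)]

-- find? respects pointwise-equal predicates on the members
lemma pv_find?_congr {p q : Int → Bool} : ∀ (l : List Int),
    (∀ x ∈ l, p x = q x) → l.find? p = l.find? q := by
  intro l
  induction l with
  | nil => intro _; rfl
  | cons x xs ih =>
    intro h
    have hx := h x List.mem_cons_self
    by_cases hp : p x = true
    · rw [List.find?_cons_of_pos hp, List.find?_cons_of_pos (hx ▸ hp)]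
    · rw [List.find?_cons_of_neg hp, List.find?_cons_of_neg (by rw [← hx]; exact hp),
        ih (fun y hy => h y (List.mem_cons_of_mem _ hy))]

-- appending on the right does not change in-range reads
lemma pv_getD_append (l : List Int) (x : Int) (i : Int) (d : Int)
    (h0 : 0 ≤ i) (h1 : i < (l.length : Int)) :
    PySem.List.pyGetD (l ++ [x]) i d = PySem.List.pyGetD l i d := by
  rw [PySem.List.pyGetD_eq_getElem _ _ h0 (by simp; omega),
      PySem.List.pyGetD_eq_getElem _ _ h0 (by omega)]
  exact List.getElem_append_left (by omega)

lemma pv_getD_append_last (l : List Int) (x : Int) (d : Int) :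
    PySem.List.pyGetD (l ++ [x]) (l.length : Int) d = x := by
  rw [PySem.List.pyGetD_eq_getElem _ _ (by omega) (by simp)]
  simp

lemma pv_tab_len (prices : List Int) (cut_price : Int) : ∀ m,
    (pvTabB prices cut_price m).length = m + 1 := by
  intro m
  induction m with
  | zero => rfl
  | succ s ih => simp [pvTabB, pvBestStep, ih]

lemma pv_tab_succ (prices : List Int) (cut_price : Int) (m : Nat) :
    ∃ v, pvTabB prices cut_price (m + 1) = pvTabB prices cut_price m ++ [v] := by
  exact ⟨_, rfl⟩

lemma pv_tab_zero (prices : List Int) (cut_price : Int) : ∀ m,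
    PySem.List.pyGetD (pvTabB prices cut_price m) 0 0 = 0 := by
  intro m
  induction m with
  | zero => rfl
  | succ s ih =>
    obtain ⟨v, hv⟩ := pv_tab_succ prices cut_price s
    rw [hv, pv_getD_append _ _ _ _ le_rfl (by rw [pv_tab_len]; omega)]
    exact ih

-- table reads below an index are stable under further iterations
lemma pv_tab_stable (prices : List Int) (cut_price : Int) (m : Nat) : ∀ m', m ≤ m' →
    ∀ i : Int, 0 ≤ i → i ≤ (m : Int) →
      PySem.List.pyGetD (pvTabB prices cut_price m') i 0
        = PySem.List.pyGetD (pvTabB prices cut_price m) i 0 := by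
  intro m'
  induction m' with
  | zero =>
    intro hm i h0 h1
    have hz : m = 0 := by omega
    rw [hz]
  | succ s ih =>
    intro hm i h0 h1
    by_cases h : m = s + 1
    · rw [h]
    · have hms : m ≤ s := by omega
      obtain ⟨v, hv⟩ := pv_tab_succ prices cut_price s
      rw [hv, pv_getD_append _ _ _ _ h0 (by rw [pv_tab_len]; omega)]
      exact ih hms i h0 h1

-- range(1, n+1) is range(0, n) shifted by one
lemma pv_range_shift (m : Nat) :
    PySem.List.pyRange 1 ((m : Int) + 1) 1
      = (PySem.List.pyRange 0 (m : Int) 1).map (fun j => j + 1) := by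
  rw [PySem.List.pyRange_one, PySem.List.pyRange_one, List.map_map]
  have : ((m : Int) + 1 - 1).toNat = ((m : Int) - 0).toNat := by omega
  rw [this]
  congr 1
  funext k
  simp; ring

-- B's fold builds pvTabB
lemma pv_stateB (prices : List Int) (cut_price : Int) : ∀ m : Nat,
    (PySem.List.pyRange 1 ((m : Int) + 1) 1).foldl (pvBestStep prices cut_price) [0]
      = pvTabB prices cut_price m := by
  intro m
  induction m with
  | zero => rw [PySem.List.pyRange_one_eq_nil (by omega)]; rfl
  | succ n ih =>
    have hc : ((n + 1 : Nat) : Int) + 1 = ((n : Int) + 1) + 1 := by push_cast; ring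
    rw [hc, PySem.List.pyRange_one_succ_right (by omega), List.foldl_append, ih]
    simp only [List.foldl]
    rfl

-- the value appended by B at step m+1 equals the running max of A's candidates, shifted by cut_price
lemma pv_step_value (prices : List Int) (cut_price : Int) (m : Nat) :
    pvTabB prices cut_price (m + 1)
      = pvTabB prices cut_price m ++
        [pvFM (fun j => PySem.List.pyGetD prices j 0
            + PySem.List.pyGetD (pvTabB prices cut_price m) ((m : Int) - j) 0)
          (PySem.List.pyRange 0 (m : Int) 1)
          (PySem.List.pyGetD prices (m : Int) 0) - cut_price] := by
  have hmap : (PySem.List.pyRange 1 ((m : Int) + 1) 1).map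
      (fun k => PySem.List.pyGetD prices (k - 1) 0 - cut_price
        + PySem.List.pyGetD (pvTabB prices cut_price m) ((m : Int) + 1 - k) 0)
      = (PySem.List.pyRange 0 (m : Int) 1).map
          (fun j => (PySem.List.pyGetD prices j 0
              + PySem.List.pyGetD (pvTabB prices cut_price m) ((m : Int) - j) 0) - cut_price) := by
    rw [pv_range_shift m, List.map_map]
    apply List.map_congr_left
    intro j _
    simp only [Function.comp]
    rw [show (j : Int) + 1 - 1 = j from by ring,
        show (m : Int) + 1 - (j + 1) = (m : Int) - j from by ring]
    ring
  show pvBestStep prices cut_price (pvTabB prices cut_price m) ((m : Int) + 1)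
      = _
  unfold pvBestStep
  congr 1
  have h1 : (1 : Int) ≤ (m : Int) + 1 := by omega
  rw [PySem.List.pyRange_one_succ_right h1, List.map_append, hmap, List.map_singleton]
  rw [show ((m : Int) + 1 - ((m : Int) + 1)) = 0 from by ring,
      show ((m : Int) + 1 - 1) = (m : Int) from by ring,
      pv_tab_zero prices cut_price m]
  rcases Nat.eq_zero_or_pos m with hm | hm
  · subst hm
    rw [show ((0 : Nat) : Int) = 0 from rfl, PySem.List.pyRange_one_eq_nil le_rfl]
    rw [List.map_nil, List.nil_append, PySem.List.max?_id_cons, pvFM_nil]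
    simp
  · rw [PySem.List.pyRange_one_cons (by omega : (0 : Int) < (m : Int)), List.map_cons,
        List.cons_append, PySem.List.max?_id_cons, List.foldl_append, List.foldl_map,
        pvFM_sub, pvFM_cons]
    simp only [List.foldl, Option.getD_some]
    congr 1
    rw [show PySem.List.pyGetD prices ((m : Nat) : Int) 0 - cut_price + 0
          = PySem.List.pyGetD prices ((m : Nat) : Int) 0 - cut_price from by ring,
        max_sub_sub_right, max_comm (PySem.List.pyGetD prices ((m : Nat) : Int) 0),
        pvFM_init_max]

-- Bool: subtracting a constant from both sides keeps == unchanged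
lemma pv_beq_shift (a b c : Int) : ((a - c) == (b - c)) = (a == b) := by
  by_cases h : a = b
  · subst h; simp
  · rw [beq_eq_false_iff_ne.mpr (show a - c ≠ b - c from by omega),
        beq_eq_false_iff_ne.mpr h]

-- A's outer-loop state after m iterations
def pvStA (prices : List Int) (cut_price : Int) (m : Nat) : List Int × List Int :=
  (PySem.List.pyRange 0 (m : Int) 1).foldl (pvOuterA prices cut_price) ([], [])

lemma pvStA_succ (prices : List Int) (cut_price : Int) (m : Nat) :
    pvStA prices cut_price (m + 1)
      = pvOuterA prices cut_price (pvStA prices cut_price m) (m : Int) := by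
  unfold pvStA
  rw [show ((m + 1 : Nat) : Int) = (m : Int) + 1 from by push_cast; ring,
      PySem.List.pyRange_one_succ_right (by omega : (0 : Int) ≤ (m : Int)), List.foldl_append]
  rfl

-- pvFirstPiece only reads table entries at indices ≤ n, so it is stable under further iterations
lemma pv_piece_stable (prices : List Int) (cut_price : Int) (m m' : Nat) (hm : m ≤ m')
    (n : Nat) (h1 : 1 ≤ n) (h2 : n ≤ m) :
    pvFirstPiece prices cut_price (pvTabB prices cut_price m') (n : Int)
      = pvFirstPiece prices cut_price (pvTabB prices cut_price m) (n : Int) := by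
  have hbn : PySem.List.pyGetD (pvTabB prices cut_price m') (n : Int) 0
      = PySem.List.pyGetD (pvTabB prices cut_price m) (n : Int) 0 :=
    pv_tab_stable prices cut_price m m' hm (n : Int) (by omega) (by omega)
  unfold pvFirstPiece
  rw [hbn]
  by_cases hc : PySem.List.pyGetD (pvTabB prices cut_price m) (n : Int) 0
      = PySem.List.pyGetD prices ((n : Int) - 1) 0 - cut_price
  · rw [if_pos hc, if_pos hc]
  · rw [if_neg hc, if_neg hc]
    congr 1
    apply pv_find?_congr
    intro k hk
    rw [PySem.List.mem_pyRange_one] at hk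
    rw [pv_tab_stable prices cut_price m m' hm ((n : Int) - k) (by omega) (by omega)]

-- the invariant: A's optimals are B's table shifted by cut_price, and every stored
-- dirty cut is (B's recomputed first piece) - 1, lying in [0, n)
lemma pv_inv (prices : List Int) (cut_price : Int) : ∀ m : Nat,
    (pvStA prices cut_price m).1.length = m ∧
    (pvStA prices cut_price m).2.length = m ∧
    (∀ i : Nat, i < m →
      PySem.List.pyGetD (pvStA prices cut_price m).1 (i : Int) 0
        = PySem.List.pyGetD (pvTabB prices cut_price m) ((i : Int) + 1) 0 + cut_price) ∧
    (∀ n : Nat, 1 ≤ n → n ≤ m →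
      PySem.List.pyGetD (pvStA prices cut_price m).2 ((n : Int) - 1) 0 + 1
          = pvFirstPiece prices cut_price (pvTabB prices cut_price m) (n : Int)
        ∧ 0 ≤ PySem.List.pyGetD (pvStA prices cut_price m).2 ((n : Int) - 1) 0
        ∧ PySem.List.pyGetD (pvStA prices cut_price m).2 ((n : Int) - 1) 0 < (n : Int)) := by
  intro m
  induction m with
  | zero =>
    refine ⟨rfl, rfl, ?_, ?_⟩
    · intro i hi; omega
    · intro n hn1 hn2; omega
  | succ m ih =>
    obtain ⟨hlen1, hlen2, hval, hpiece⟩ := ih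
    -- notation
    set t := pvTabB prices cut_price m with ht
    set st := pvStA prices cut_price m with hst
    set g : Int → Int := fun j => PySem.List.pyGetD prices j 0
        + PySem.List.pyGetD t ((m : Int) - j) 0 with hg
    set v0 := PySem.List.pyGetD prices (m : Int) 0 with hv0
    set M := pvFM g (PySem.List.pyRange 0 (m : Int) 1) v0 with hM
    -- the inner fold of A's (m+1)-st outer iteration, rewritten through the invariant
    have hfold : (PySem.List.pyRange 0 (m : Int) 1).foldl
        (fun (a : Int × Int) j =>
          let test := PySem.List.pyGetD prices j 0 - cut_price
              + PySem.List.pyGetD st.1 ((m : Int) - j - 1) 0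
          if a.1 < test then (test, j) else a)
        (v0, (m : Int))
        = (M, if M = v0 then (m : Int)
              else ((PySem.List.pyRange 0 (m : Int) 1).find? (fun j => M == g j)).getD (m : Int)) := by
      rw [PySem.List.foldl_congr_mem _ _
          (fun (a : Int × Int) j => if a.1 < g j then (g j, j) else a) _ ?_]
      · rw [hM]; exact pv_strict_fold g _ v0 (m : Int)
      · intro a j hj
        rw [PySem.List.mem_pyRange_one] at hj
        have hidx : PySem.List.pyGetD st.1 ((m : Int) - j - 1) 0
            = PySem.List.pyGetD t ((m : Int) - j) 0 + cut_price := by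
          have hj' : ((m : Int) - j - 1).toNat < m := by omega
          have := hval ((m : Int) - j - 1).toNat hj'
          rw [show ((((m : Int) - j - 1).toNat : Nat) : Int) = (m : Int) - j - 1 from by omega] at this
          rw [this, show (m : Int) - j - 1 + 1 = (m : Int) - j from by ring]
        simp only [hidx, hg]
        rw [show PySem.List.pyGetD prices j 0 - cut_price
            + (PySem.List.pyGetD t ((m : Int) - j) 0 + cut_price)
            = PySem.List.pyGetD prices j 0 + PySem.List.pyGetD t ((m : Int) - j) 0 from by ring]
    have hstep : pvStA prices cut_price (m + 1)
        = (st.1 ++ [M],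
           st.2 ++ [if M = v0 then (m : Int)
              else ((PySem.List.pyRange 0 (m : Int) 1).find? (fun j => M == g j)).getD (m : Int)]) := by
      rw [pvStA_succ]
      unfold pvOuterA
      rw [← hst, ← hv0, hfold]
    have htab : pvTabB prices cut_price (m + 1) = t ++ [M - cut_price] := pv_step_value prices cut_price m
    have htlen : (t.length : Int) = (m : Int) + 1 := by rw [ht, pv_tab_len]; push_cast; ring
    -- the new piece, at n = m+1
    have hnew : (if M = v0 then (m : Int)
          else ((PySem.List.pyRange 0 (m : Int) 1).find? (fun j => M == g j)).getD (m : Int)) + 1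
            = pvFirstPiece prices cut_price (t ++ [M - cut_price]) ((m : Int) + 1)
        ∧ 0 ≤ (if M = v0 then (m : Int)
          else ((PySem.List.pyRange 0 (m : Int) 1).find? (fun j => M == g j)).getD (m : Int))
        ∧ (if M = v0 then (m : Int)
          else ((PySem.List.pyRange 0 (m : Int) 1).find? (fun j => M == g j)).getD (m : Int)) < (m : Int) + 1 := by
      have hread : PySem.List.pyGetD (t ++ [M - cut_price]) ((m : Int) + 1) 0 = M - cut_price := by
        rw [← htlen, pv_getD_append_last]
      have hcond : (PySem.List.pyGetD (t ++ [M - cut_price]) ((m : Int) + 1) 0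
            = PySem.List.pyGetD prices ((m : Int) + 1 - 1) 0 - cut_price) ↔ M = v0 := by
        rw [hread, show (m : Int) + 1 - 1 = (m : Int) from by ring, ← hv0]
        omega
      unfold pvFirstPiece
      by_cases hMv : M = v0
      · rw [if_pos (hcond.mpr hMv), if_pos hMv]
        exact ⟨rfl, by omega, by omega⟩
      · rw [if_neg (fun h => hMv (hcond.mp h)), if_neg hMv]
        -- rewrite B's find? into A's
        have hfind : ((PySem.List.pyRange 1 ((m : Int) + 1) 1).find? (fun k =>
              PySem.List.pyGetD (t ++ [M - cut_price]) ((m : Int) + 1) 0 ==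
                PySem.List.pyGetD prices (k - 1) 0 - cut_price
                  + PySem.List.pyGetD (t ++ [M - cut_price]) ((m : Int) + 1 - k) 0))
            = ((PySem.List.pyRange 0 (m : Int) 1).find? (fun j => M == g j)).map (fun j => j + 1) := by
          rw [pv_find?_congr _ (fun k hk => ?_) (q := fun k =>
              M - cut_price == PySem.List.pyGetD prices (k - 1) 0 - cut_price
                + PySem.List.pyGetD t ((m : Int) + 1 - k) 0)]
          · rw [pv_range_shift m, List.find?_map]
            refine congrArg (Option.map _) (pv_find?_congr _ (fun j _ => ?_))
            simp only [Function.comp]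
            rw [show (j : Int) + 1 - 1 = j from by ring,
                show (m : Int) + 1 - (j + 1) = (m : Int) - j from by ring,
                show PySem.List.pyGetD prices j 0 - cut_price
                    + PySem.List.pyGetD t ((m : Int) - j) 0 = g j - cut_price from by
                  simp only [hg]; ring,
                pv_beq_shift]
          · rw [PySem.List.mem_pyRange_one] at hk
            rw [hread, pv_getD_append _ _ _ _ (by omega) (by omega)]
        rw [hfind]
        rcases pvFM_attained g (PySem.List.pyRange 0 (m : Int) 1) v0 with hat | ⟨j, hj, hgj⟩
        · exact absurd (hM ▸ hat) hMv
        · have hsome : ((PySem.List.pyRange 0 (m : Int) 1).find? (fun j => M == g j)).isSome := by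
            rw [List.find?_isSome]
            exact ⟨j, hj, by simp [hgj, hM]⟩
          rcases Option.isSome_iff_exists.mp hsome with ⟨k, hk⟩
          have hkmem : k ∈ PySem.List.pyRange 0 (m : Int) 1 := List.mem_of_find?_eq_some hk
          rw [PySem.List.mem_pyRange_one] at hkmem
          rw [hk, Option.map_some, Option.getD_some, Option.getD_some]
          exact ⟨rfl, by omega, by omega⟩
    -- assemble the four conjuncts
    rw [hstep, htab]
    refine ⟨by simp [hlen1], by simp [hlen2], ?_, ?_⟩
    · intro i hi
      dsimp only
      rcases Nat.lt_succ_iff_lt_or_eq.mp hi with hi' | hi'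
      · rw [pv_getD_append _ _ _ _ (by omega) (by rw [hlen1]; omega),
            pv_getD_append _ _ _ _ (by omega) (by rw [ht, pv_tab_len]; omega)]
        exact hval i hi'
      · subst hi'
        rw [show (i : Int) = (st.1.length : Int) from by rw [hlen1], pv_getD_append_last,
            show ((st.1.length : Int) + 1) = (t.length : Int) from by rw [hlen1, htlen],
            pv_getD_append_last]
        ring
    · intro n hn1 hn2
      dsimp only
      rcases Nat.lt_succ_iff_lt_or_eq.mp (Nat.lt_succ_of_le hn2) with hn' | hn'
      · -- n ≤ m: the old entry and the old piece, via one-step stability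
        have hnle : n ≤ m := by omega
        have hD : PySem.List.pyGetD (st.2 ++ [if M = v0 then (m : Int)
              else ((PySem.List.pyRange 0 (m : Int) 1).find? (fun j => M == g j)).getD (m : Int)])
            ((n : Int) - 1) 0 = PySem.List.pyGetD st.2 ((n : Int) - 1) 0 :=
          pv_getD_append _ _ _ _ (by omega) (by rw [hlen2]; omega)
        have hps : pvFirstPiece prices cut_price (t ++ [M - cut_price]) (n : Int)
            = pvFirstPiece prices cut_price t (n : Int) := by
          rw [← htab, ht]
          exact pv_piece_stable prices cut_price m (m + 1) (Nat.le_succ m) n hn1 hnle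
        rw [hD, hps]
        exact hpiece n hn1 hnle
      · -- n = m+1: the freshly appended entry
        subst hn'
        have hidx : ((m + 1 : Nat) : Int) - 1 = (st.2.length : Int) := by
          rw [hlen2]; omega
        rw [hidx, pv_getD_append_last,
            show ((m + 1 : Nat) : Int) = (m : Int) + 1 from by push_cast; ring]
        exact hnew

-- the two traceback loops agree step by step
lemma pv_trace (prices : List Int) (cut_price : Int) (m : Nat) (D : List Int)
    (h : ∀ n : Nat, 1 ≤ n → n ≤ m →
      PySem.List.pyGetD D ((n : Int) - 1) 0 + 1
          = pvFirstPiece prices cut_price (pvTabB prices cut_price m) (n : Int)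
        ∧ 0 ≤ PySem.List.pyGetD D ((n : Int) - 1) 0
        ∧ PySem.List.pyGetD D ((n : Int) - 1) 0 < (n : Int)) :
    ∀ (fuel : Nat) (i : Int), 0 ≤ i → i ≤ (m : Int) →
      pvRebuildA D fuel i = pvTraceB prices cut_price (pvTabB prices cut_price m) fuel i := by
  intro fuel
  induction fuel with
  | zero => intro i _ _; rfl
  | succ f ih =>
    intro i h0 h1
    simp only [pvRebuildA, pvTraceB]
    by_cases hi : 0 < i
    · rw [if_pos hi, if_pos hi]
      have hcast : ((i.toNat : Nat) : Int) = i := by omega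
      obtain ⟨he, he0, he1⟩ := h i.toNat (by omega) (by omega)
      rw [hcast] at he he0 he1
      rw [he]
      exact congrArg _ (ih _ (by omega) (by omega))
    · rw [if_neg hi, if_neg hi]

-- ===== VERDICT (by name: the statement is the Claim_ definition above) =====
theorem costly_cuts_spec : Claim_equal_costly_cuts := by
  intro prices cut_price total_length _ hpre
  obtain ⟨-, h1, -⟩ := hpre
  obtain ⟨m, rfl⟩ : ∃ m : Nat, total_length = (m : Int) := ⟨total_length.toNat, by omega⟩
  obtain ⟨hlen1, hlen2, hval, hpiece⟩ := pv_inv prices cut_price m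
  simp only [Spec_costly_cuts, costly_cuts, costly_cuts_alt, Int.toNat_natCast]
  rw [pv_stateB prices cut_price m]
  show ((PySem.List.pyGetD (pvStA prices cut_price m).1 ((m : Int) - 1) 0, _) :
      Int × List Int) = _
  have hm1 : 1 ≤ m := by omega
  have hv := hval (m - 1) (by omega)
  rw [show (((m - 1 : Nat)) : Int) = (m : Int) - 1 from by omega] at hv
  rw [hv, show (m : Int) - 1 + 1 = (m : Int) from by ring]
  exact Prod.ext rfl (pv_trace prices cut_price m _ hpiece m (m : Int) (by omega) le_rfl)
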